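-- pv_equiv track=rewrite | github.com/CrambitHazard/mcq-ml | mcq_bias_model/features.py | _find_common_prefixes
-- ===== SOURCE A (Python) =====
-- from typing import Dict, List, Any, Tuple, Optional
--
-- def _find_common_prefixes(options: List[str]) -> List[str]:
--     """Find common prefixes among options."""
--     if len(options) < 2:
--         return []
--
--     prefixes = []
--     for length in range(1, min(10, min(len(str(opt)) for opt in options)) + 1):
--         prefix = str(options[0])[:length].lower()
--         if all(str(opt)[:length].lower() == prefix for opt in options):
--             prefixes.append(prefix)
--
--     return prefixes
-- ===== SOURCE B (Python) =====
-- def _find_common_prefixes(options):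
--     """Find common prefixes among options (single early-terminating LCP-style pass)."""
--     if len(options) < 2:
--         return []
--     strs = [str(opt) for opt in options]
--     base = strs[0]
--     cap = min(10, min(len(s) for s in strs))
--     prefixes = []
--     for pos in range(cap):
--         ch = base[pos].lower()
--         if all(s[pos].lower() == ch for s in strs):
--             prefixes.append(base[:pos + 1].lower())
--         else:
--             break
--     return prefixes
-- ===== Notes on version B (the rewrite author's own statement) =====
-- stated objective: alternative
-- what changed: B replaces A's per-length full re-scan (for each candidate length 1..10 it re-slices and re-lowercases every option's whole prefix) with a single character-position LCP-style pass that compares one lowercased character per option per position and breaks at the first mismatch; the prefix-length cap of 10 keeps both within the same measured cost.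
import Mathlib
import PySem

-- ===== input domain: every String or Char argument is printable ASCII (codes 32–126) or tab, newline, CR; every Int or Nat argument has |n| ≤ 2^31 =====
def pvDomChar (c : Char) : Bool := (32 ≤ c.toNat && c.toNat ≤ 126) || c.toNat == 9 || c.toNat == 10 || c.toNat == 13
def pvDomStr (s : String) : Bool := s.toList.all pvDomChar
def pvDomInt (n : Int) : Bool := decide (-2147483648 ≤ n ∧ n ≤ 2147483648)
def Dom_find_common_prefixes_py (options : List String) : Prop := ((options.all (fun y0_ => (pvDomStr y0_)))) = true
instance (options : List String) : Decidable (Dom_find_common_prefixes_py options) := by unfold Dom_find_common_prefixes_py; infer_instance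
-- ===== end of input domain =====

-- B replaces A's repeated prefix re-slicing/re-lowercasing per candidate length with a single
-- early-terminating character-position (LCP-style) pass; same return value, alternative algorithm.

-- ===== PORT A =====
-- literal port of A: guard, then for length in range(1, min(10, min(len(opt)))+1)
-- compare the lowercased length-prefix of every option against options[0]'s.
def find_common_prefixes_py (options : List String) : List String :=
  if options.length < 2 then []
  else
    let minLen : Int := (PySem.List.min? (options.map PySem.Str.len) (fun x => x)).getD 0
    (PySem.List.pyRange 1 (min 10 minLen + 1)).foldl
      (fun acc length =>
        -- str(options[0])[:length].lower(); length ≥ 1 here so .toNat is exact for the slice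
        let pfx := PySem.Chars.lower ((options.headD "").toList.take length.toNat)
        if options.all (fun opt => PySem.Chars.lower (opt.toList.take length.toNat) == pfx)
        then acc ++ [String.ofList pfx] else acc) []

-- ===== PORT B =====
-- the for-pos loop of Source B with its early break (pos < cap ≤ len s, so getD never takes its default)
def pvAltLoop (strs : List (List Char)) (base : List Char) (cap : Nat) (pos : Nat)
    (acc : List String) : List String :=
  if pos < cap then
    if strs.all (fun s => PySem.Chars.lowerChar (s.getD pos ' ')
                            == PySem.Chars.lowerChar (base.getD pos ' ')) then
      pvAltLoop strs base cap (pos + 1) (acc ++ [String.ofList (PySem.Chars.lower (base.take (pos + 1)))])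
    else acc
  else acc
termination_by cap - pos

def find_common_prefixes_py_alt (options : List String) : List String :=
  if options.length < 2 then []
  else
    let strs := options.map String.toList
    let base := strs.headD []
    let cap : Nat := (min 10 ((PySem.List.min? (strs.map (fun s => (s.length : Int))) (fun x => x)).getD 0)).toNat
    pvAltLoop strs base cap 0 []

-- ===== PRECONDITION & SPEC =====
def Spec_find_common_prefixes_py (options : List String) (out : List String) : Prop := out = find_common_prefixes_py_alt options
instance (options : List String) (out : List String) : Decidable (Spec_find_common_prefixes_py options out) := by unfold Spec_find_common_prefixes_py; infer_instance

-- ===== CLAIM (what is proved, stated in full; the proofs are below) =====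
def Claim_equal_find_common_prefixes_py : Prop := ∀ (options : List String), Dom_find_common_prefixes_py options → Spec_find_common_prefixes_py options (find_common_prefixes_py options)

-- ===== LEMMAS AND PROOFS =====

-- lowercased length-L prefixes are beq-equal iff the lowercased characters agree at every position < L
lemma pvTake_beq (L : Nat) : ∀ (a b : List Char), L ≤ a.length → L ≤ b.length →
    (PySem.Chars.lower (a.take L) == PySem.Chars.lower (b.take L)) =
    (List.range L).all (fun p => PySem.Chars.lowerChar (a.getD p ' ')
                                   == PySem.Chars.lowerChar (b.getD p ' ')) := by
  induction L with
  | zero => intro a b _ _; simp [PySem.Chars.lower]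
  | succ L ih =>
    intro a b ha hb
    cases a with
    | nil => simp at ha
    | cons x a' =>
      cases b with
      | nil => simp at hb
      | cons y b' =>
        simp only [List.take_succ_cons, PySem.Chars.lower, List.map_cons, List.cons_beq_cons,
          List.range_succ_eq_map, List.all_cons, List.all_map, Function.comp_def,
          List.getD_cons_zero, List.getD_cons_succ, Nat.succ_eq_add_one]
        have h := ih a' b' (by simpa using ha) (by simpa using hb)
        simp only [PySem.Chars.lower] at h
        rw [h]

-- `all` respects a pointwise-on-members equal predicate
lemma pvAll_congr {α : Type} {l : List α} {p q : α → Bool} (h : ∀ x ∈ l, p x = q x) :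
    l.all p = l.all q := by
  induction l with
  | nil => rfl
  | cons x t ih =>
    simp only [List.all_cons]
    rw [h x (by simp), ih (fun y hy => h y (by simp [hy]))]

-- swap the two bounded quantifiers of a Bool `all`
lemma pvAll_swap {α β : Type} (xs : List α) (ys : List β) (g : α → β → Bool) :
    xs.all (fun x => ys.all (fun y => g x y)) = ys.all (fun y => xs.all (fun x => g x y)) := by
  rw [Bool.eq_iff_iff]
  simp only [List.all_eq_true]
  tauto

-- a filter by "all positions up to k match" over a block of consecutive indices is a takeWhile
lemma pvFilter_takeWhile (q : Nat → Bool) : ∀ (n s : Nat), (∀ p, p < s → q p = true) →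
    ((List.range' s n).filter (fun k => (List.range (k + 1)).all q)) =
    (List.range' s n).takeWhile q := by
  intro n
  induction n with
  | zero => intro s _; simp
  | succ n ih =>
    intro s hs
    rw [List.range'_succ]
    by_cases hq : q s = true
    · have hall : (List.range (s + 1)).all q = true := by
        simp only [List.all_eq_true, List.mem_range]
        intro p hp
        rcases Nat.lt_succ_iff_lt_or_eq.mp hp with h | h
        · exact hs p h
        · simpa [h] using hq
      simp only [List.filter_cons, List.takeWhile_cons, hall, hq, if_true]
      rw [ih (s + 1) (by intro p hp; rcases Nat.lt_succ_iff_lt_or_eq.mp hp with h | h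
                         · exact hs p h
                         · simpa [h] using hq)]
    · have hq' : q s = false := by simpa using hq
      have hall : (List.range (s + 1)).all q = false := by
        apply List.all_eq_false.mpr
        exact ⟨s, by simp, by simp [hq']⟩
      simp only [List.filter_cons, List.takeWhile_cons, hall, hq', Bool.false_eq_true, if_false]
      apply List.filter_eq_nil_iff.mpr
      intro k hk
      have hsk : s < k + 1 := by
        have := (List.mem_range'_1.mp hk).1
        omega
      simp only [List.all_eq_true, not_forall]
      exact ⟨s, by simp [List.mem_range, hsk], by simp [hq']⟩

-- the early-break loop of B computes the takeWhile of the remaining positions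
lemma pvAltLoop_eq (strs : List (List Char)) (base : List Char) :
    ∀ (n cap pos : Nat), cap - pos = n → ∀ (acc : List String),
    pvAltLoop strs base cap pos acc =
      acc ++ (((List.range' pos n).takeWhile
                 (fun p => strs.all (fun s => PySem.Chars.lowerChar (s.getD p ' ')
                                       == PySem.Chars.lowerChar (base.getD p ' ')))).map
               (fun k => String.ofList (PySem.Chars.lower (base.take (k + 1))))) := by
  intro n
  induction n with
  | zero =>
    intro cap pos h acc
    rw [pvAltLoop]
    have : ¬ pos < cap := by omega
    simp [this]
  | succ n ih =>
    intro cap pos h acc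
    rw [pvAltLoop]
    have hlt : pos < cap := by omega
    rw [List.range'_succ, List.takeWhile_cons]
    by_cases hm : strs.all (fun s => PySem.Chars.lowerChar (s.getD pos ' ')
                              == PySem.Chars.lowerChar (base.getD pos ' ')) = true
    · simp only [hlt, if_true, hm, List.map_cons]
      rw [ih cap (pos + 1) (by omega)]
      simp
    · have hm' : (strs.all (fun s => PySem.Chars.lowerChar (s.getD pos ' ')
                              == PySem.Chars.lowerChar (base.getD pos ' '))) = false := by
        simpa using hm
      simp only [hlt, if_true, hm', Bool.false_eq_true, if_false, List.map_nil, List.append_nil]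

-- pyRange 1 (c+1) enumerates the casts of 1..c
lemma pvRange_bridge : ∀ (c : Nat),
    PySem.List.pyRange 1 ((c : Int) + 1) = (List.range c).map (fun (k : Nat) => ((k : Int) + 1)) := by
  intro c
  induction c with
  | zero => decide
  | succ c ih =>
    have h1 : (1 : Int) ≤ (c : Int) + 1 := by omega
    have h2 : ((c + 1 : Nat) : Int) + 1 = ((c : Int) + 1) + 1 := by push_cast; ring
    rw [h2, PySem.List.pyRange_one_succ_right h1, ih, List.range_succ]
    simp

-- the default-0 minimum is a lower bound on every member
lemma pvMin_le {xs : List Int} {x : Int} (hx : x ∈ xs) :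
    (PySem.List.min? xs (fun y => y)).getD 0 ≤ x := by
  cases h : PySem.List.min? xs (fun y => y) with
  | none =>
    exact absurd (List.eq_nil_iff_forall_not_mem.mp ((PySem.List.min?_eq_none_iff _ _).mp h) x) (by simp [hx])
  | some m =>
    simpa using PySem.List.min?_isMin h x hx

-- ===== VERDICT (by name: the statement is the Claim_ definition above) =====
theorem find_common_prefixes_py_spec : Claim_equal_find_common_prefixes_py := by
  intro options _
  unfold Spec_find_common_prefixes_py find_common_prefixes_py find_common_prefixes_py_alt
  by_cases h2 : options.length < 2
  · simp only [h2, if_true]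
  · simp only [h2, if_false]
    cases options with
    | nil => simp at h2
    | cons o rest =>
      set matchAt : Nat → Bool := fun p =>
        (o :: rest).all (fun opt => PySem.Chars.lowerChar (opt.toList.getD p ' ')
                            == PySem.Chars.lowerChar (o.toList.getD p ' ')) with hmatch
      have hlenmap : ((o :: rest).map String.toList).map (fun s => ((s : List Char).length : Int))
            = (o :: rest).map PySem.Str.len := by
        rw [List.map_map]; exact List.map_congr_left (fun s _ => (PySem.Str.len_eq s).symm)
      set minLen : Int := (PySem.List.min? ((o :: rest).map PySem.Str.len) (fun x => x)).getD 0 with hminLen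
      have hbound : ∀ opt ∈ (o :: rest), minLen ≤ (opt.toList.length : Int) := by
        intro opt hopt
        rw [hminLen, ← PySem.Str.len_eq]
        exact pvMin_le (List.mem_map_of_mem hopt)
      have hnn0 : 0 ≤ minLen := by
        rw [hminLen]
        cases h : PySem.List.min? ((o :: rest).map PySem.Str.len) (fun x => x) with
        | none => simp
        | some m =>
          obtain ⟨s, _, rfl⟩ := List.mem_map.mp (PySem.List.min?_mem h)
          rw [PySem.Str.len_eq]
          simp
      set capN : Nat := (min 10 minLen).toNat with hcapN
      have hcast : min 10 minLen = (capN : Int) := by omega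
      have hcap_le : ∀ opt ∈ (o :: rest), capN ≤ opt.toList.length := by
        intro opt hopt
        have := hbound opt hopt
        omega
      have hpred : (fun p => ((o :: rest).map String.toList).all
            (fun s => PySem.Chars.lowerChar (s.getD p ' ')
                == PySem.Chars.lowerChar ((((o :: rest).map String.toList).headD []).getD p ' ')))
          = matchAt := by
        funext p
        rw [hmatch]
        simp [List.all_map, Function.comp_def]
      -- B side reduces to a takeWhile over positions 0..capN-1
      rw [hlenmap, ← hminLen, ← hcapN,
        pvAltLoop_eq _ _ capN capN 0 (by omega), List.nil_append, hpred]
      have hbase : (((o :: rest).map String.toList).headD []) = o.toList := by simp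
      rw [hbase]
      -- A side: fold over pyRange → filter/map over List.range capN
      rw [hcast, pvRange_bridge, List.foldl_map]
      have htonat : ∀ k : Nat, (((k : Int) + 1)).toNat = k + 1 := by intro k; omega
      have hfun : (fun (acc : List String) (k : Nat) =>
            let pfx := PySem.Chars.lower (((o :: rest).headD "").toList.take ((k : Int) + 1).toNat)
            if (o :: rest).all (fun opt => PySem.Chars.lower (opt.toList.take ((k : Int) + 1).toNat) == pfx)
            then acc ++ [String.ofList pfx] else acc)
          = (fun acc k =>
            if (o :: rest).all (fun opt => PySem.Chars.lower (opt.toList.take (k + 1))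
                 == PySem.Chars.lower (o.toList.take (k + 1)))
            then acc ++ [String.ofList (PySem.Chars.lower (o.toList.take (k + 1)))] else acc) := by
        funext acc k
        simp [htonat]
      rw [hfun, PySem.List.foldl_append_if, List.nil_append]
      congr 1
      rw [List.filter_congr (q := fun k => (List.range (k + 1)).all matchAt)]
      · rw [List.range_eq_range', pvFilter_takeWhile matchAt capN 0 (by intro p hp; omega)]
      · intro k hk
        have hstep : ∀ opt ∈ (o :: rest),
            (PySem.Chars.lower (opt.toList.take (k + 1)) == PySem.Chars.lower (o.toList.take (k + 1)))
            = (List.range (k + 1)).all (fun p => PySem.Chars.lowerChar (opt.toList.getD p ' ')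
                == PySem.Chars.lowerChar (o.toList.getD p ' ')) := by
          intro opt hopt
          exact pvTake_beq (k + 1) _ _
            (by have := hcap_le opt hopt; have := List.mem_range.mp hk; omega)
            (by have := hcap_le o (by simp); have := List.mem_range.mp hk; omega)
        rw [pvAll_congr hstep, pvAll_swap]
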